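-- pv_equiv track=rewrite | github.com/MIT-LCP/waveform-annotation | waveform-django/waveforms/dash_apps/finished_apps/waveform_vis_adjudicate.py | order_sigs
-- ===== SOURCE A (Python) =====
-- def order_sigs(n_ekg_sigs, sig_name, exclude_sigs=[]):
--     """
--     Put all EKG signals before BP and RESP, then all others following.
--
--     Parameters
--     ----------
--     n_ekg_sigs : int
--         The total number of expected EKG signals.
--     sig_name : list[str]
--         The list of signal names in the order from the WFDB record.
--     exclude_sigs : list[int], optional
--         The list of signal indices to be excluded since they have already
--         been determined to have all 0s for the specified time range.
--
--     Returns
--     -------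
--     sig_order : list[str]
--         The ordered list of signal names. Should only be 4 elements long.
--     n_ekgs : int
--         The total number of actual EKG signals.
--
--     """
--     sig_order = []
--     # TODO: make case-insensitive
--     ekg_sigs = ['II', 'V', 'V5', 'V1', 'V2', 'V3', 'V4', 'V6', 'I', 'III',
--                 'aVR', 'AVR', 'aVF', 'AVF', 'aVL', 'AVL', 'MCL']
--     bp_sigs = ['ABP', 'AR1', 'AR2', 'AR3', 'IBP1', 'IBP2', 'IBP3', 'IBP4',
--                'IBP5', 'IBP6', 'IBP7', 'IBP8']
--     resp_sigs = ['PLETH', 'pleth']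
--
--     # Exclude signals which have all 0s
--     itter_sig_name = [j for i,j in enumerate(sig_name) if i not in exclude_sigs]
--     # Add a max of `n_ekg_sigs` EKG signals, the any number of BP and Resp.
--     # If not possible, try again twice by adding in order.
--     # If still not filled, just return the non-full `sig_order`.
--     n_ekgs = 0
--     for _ in range(3):
--         for ekgs in ekg_sigs:
--             if n_ekgs == n_ekg_sigs:
--                 break
--             elif ekgs in itter_sig_name:
--                 sig_order.append(sig_name.index(ekgs))
--                 n_ekgs += 1
--         if len(sig_order) < min(len(sig_name), 4):
--             for bps in bp_sigs:
--                 if (bps in itter_sig_name) and (sig_name.index(bps) not in sig_order):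
--                     sig_order.append(sig_name.index(bps))
--                     break
--             for resps in resp_sigs:
--                 if (resps in itter_sig_name) and (sig_name.index(resps) not in sig_order):
--                     sig_order.append(sig_name.index(resps))
--                     break
--             break
--
--     return sig_order, n_ekgs
-- ===== SOURCE B (Python) =====
-- def order_sigs(n_ekg_sigs, sig_name, exclude_sigs=[]):
--     ekg_sigs = ['II', 'V', 'V5', 'V1', 'V2', 'V3', 'V4', 'V6', 'I', 'III',
--                 'aVR', 'AVR', 'aVF', 'AVF', 'aVL', 'AVL', 'MCL']
--     bp_sigs = ['ABP', 'AR1', 'AR2', 'AR3', 'IBP1', 'IBP2', 'IBP3', 'IBP4',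
--                'IBP5', 'IBP6', 'IBP7', 'IBP8']
--     resp_sigs = ['PLETH', 'pleth']
--
--     excl = set(exclude_sigs)
--     present = {name for i, name in enumerate(sig_name) if i not in excl}
--
--     sig_order = []
--     for name in ekg_sigs:
--         if len(sig_order) == n_ekg_sigs:
--             break
--         if name in present:
--             sig_order.append(sig_name.index(name))
--     n_ekgs = len(sig_order)
--
--     if len(sig_order) < min(len(sig_name), 4):
--         for group in (bp_sigs, resp_sigs):
--             idx = next((sig_name.index(s) for s in group
--                         if s in present and sig_name.index(s) not in sig_order),
--                        None)
--             if idx is not None: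
--                 sig_order.append(idx)
--     return sig_order, n_ekgs
-- ===== Notes on version B (the rewrite author's own statement) =====
-- stated objective: simpler
-- what changed: Replaced the range(3) retry loop and running counter with one set-based EKG pass (break when len(sig_order)==n_ekg_sigs) plus a single next()-based pick of the first eligible BP and RESP index; membership tests use a set of present names instead of scanning the filtered list.
-- intended difference: When n_ekg_sigs is negative or exceeds the number k>0 of distinct EKG names present and k already fills min(len(sig_name),4) slots, A's retry loop re-appends the same EKG indices (e.g. ([0,0],2) for (2,['II'],[])), while B returns each EKG index once (([0],1)), which matches the docstring's at-most-4 distinct ordering intent. — e.g. on order_sigs(2, ["II"], []): A returns ([0, 0], 2), B returns ([0], 1)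
import Mathlib
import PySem

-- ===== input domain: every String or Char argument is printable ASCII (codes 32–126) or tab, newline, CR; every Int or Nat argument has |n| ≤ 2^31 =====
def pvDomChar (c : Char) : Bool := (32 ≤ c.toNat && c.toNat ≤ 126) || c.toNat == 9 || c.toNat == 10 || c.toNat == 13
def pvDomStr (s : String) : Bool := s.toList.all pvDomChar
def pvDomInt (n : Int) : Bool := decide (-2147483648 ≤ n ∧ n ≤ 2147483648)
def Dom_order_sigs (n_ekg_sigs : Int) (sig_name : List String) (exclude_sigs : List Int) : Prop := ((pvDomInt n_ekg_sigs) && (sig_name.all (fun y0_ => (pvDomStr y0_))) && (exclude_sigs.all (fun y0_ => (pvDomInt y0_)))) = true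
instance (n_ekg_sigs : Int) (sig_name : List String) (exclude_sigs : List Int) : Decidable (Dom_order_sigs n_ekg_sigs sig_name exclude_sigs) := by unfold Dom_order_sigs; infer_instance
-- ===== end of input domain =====

-- B replaces A's dead-on-ordinary-inputs range(3) retry loop and running counter with one
-- set-based EKG pass plus a single first-eligible pick for BP and RESP (objective: simpler).

-- ===== PORT A =====
-- the three literal name lists shared by both Pythons
def pvEkgSigs : List String := ["II", "V", "V5", "V1", "V2", "V3", "V4", "V6", "I", "III",
  "aVR", "AVR", "aVF", "AVF", "aVL", "AVL", "MCL"]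
def pvBpSigs : List String := ["ABP", "AR1", "AR2", "AR3", "IBP1", "IBP2", "IBP3", "IBP4",
  "IBP5", "IBP6", "IBP7", "IBP8"]
def pvRespSigs : List String := ["PLETH", "pleth"]

-- sig_name.index(e); only evaluated under a guard that e occurs in sig_name, so getD 0 is never taken
def pvIdx (sigs : List String) (e : String) : Int := ((PySem.List.index? sigs e).getD 0 : Nat)

-- [j for i,j in enumerate(sig_name) if i not in exclude_sigs]
def pvItter (sigs : List String) (excl : List Int) : List String :=
  ((PySem.List.enumerate sigs).filter (fun p => !excl.contains p.1)).map (fun p => p.2)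

-- one step of A's inner EKG for-loop ('break' = the n == N test staying true)
def pvEkgStepA (N : Int) (sigs itter : List String) (st : List Int × Int) (e : String) : List Int × Int :=
  if st.2 == N then st
  else if itter.contains e then (st.1 ++ [pvIdx sigs e], st.2 + 1) else st

-- A's BP/RESP loop: append the first eligible index, then break
def pvAddFirstA (sigs itter : List String) (so : List Int) : List String → List Int
  | [] => so
  | b :: rest =>
    if itter.contains b && !so.contains (pvIdx sigs b) then so ++ [pvIdx sigs b]
    else pvAddFirstA sigs itter so rest

-- one iteration of A's 'for _ in range(3)' loop; the Bool records the outer 'break'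
def pvOuterStep (N : Int) (sigs itter : List String) (st : List Int × Int × Bool) :
    List Int × Int × Bool :=
  if st.2.2 then st
  else
    let p := pvEkgSigs.foldl (pvEkgStepA N sigs itter) (st.1, st.2.1)
    if (p.1.length : Int) < min (sigs.length : Int) 4 then
      (pvAddFirstA sigs itter (pvAddFirstA sigs itter p.1 pvBpSigs) pvRespSigs, p.2, true)
    else (p.1, p.2, false)

def order_sigs (n_ekg_sigs : Int) (sig_name : List String) (exclude_sigs : List Int) : List Int × Int :=
  let st := (List.range 3).foldl
    (fun st _ => pvOuterStep n_ekg_sigs sig_name (pvItter sig_name exclude_sigs) st)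
    ([], 0, false)
  (st.1, st.2.1)

-- ===== PORT B =====
-- present = {name for i, name in enumerate(sig_name) if i not in set(exclude_sigs)}
def pvPresent (sigs : List String) (excl : List Int) : PySem.Set String :=
  PySem.Set.ofList (((PySem.List.enumerate sigs).filter
    (fun p => !(PySem.Set.contains (PySem.Set.ofList excl) p.1))).map (fun p => p.2))

-- B's single EKG pass, breaking when len(sig_order) == n_ekg_sigs
def pvEkgPassB (N : Int) (sigs : List String) (present : PySem.Set String) : List Int :=
  pvEkgSigs.foldl (fun so name =>
    if (so.length : Int) == N then so
    else if PySem.Set.contains present name then so ++ [pvIdx sigs name] else so) []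

-- for group in (bp_sigs, resp_sigs): idx = next((... first eligible ...), None); append if found
def pvPickGroups (sigs : List String) (present : PySem.Set String) (so : List Int) : List Int :=
  [pvBpSigs, pvRespSigs].foldl (fun so group =>
    match group.find? (fun s => PySem.Set.contains present s && !so.contains (pvIdx sigs s)) with
    | some s => so ++ [pvIdx sigs s]
    | none => so) so

def order_sigs_alt (n_ekg_sigs : Int) (sig_name : List String) (exclude_sigs : List Int) : List Int × Int :=
  let so := pvEkgPassB n_ekg_sigs sig_name (pvPresent sig_name exclude_sigs)
  (if (so.length : Int) < min (sig_name.length : Int) 4 then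
     pvPickGroups sig_name (pvPresent sig_name exclude_sigs) so
   else so,
   (so.length : Int))

-- ===== PRECONDITION & SPEC =====
-- number of EKG names still present after exclusion (used only to state D_)
def pvNumEkg (sigs : List String) (excl : List Int) : Nat :=
  (pvEkgSigs.filter (fun e => (pvItter sigs excl).contains e)).length

-- When n_ekg_sigs is negative or exceeds the number k>0 of EKG names present and those k already
-- fill min(len(sig_name),4) slots, A's retry loop re-appends the same EKG indices (duplicates),
-- while B lists each present EKG index once — the docstring's intended at-most-4 ordering.
def D_order_sigs (n_ekg_sigs : Int) (sig_name : List String) (exclude_sigs : List Int) : Prop :=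
  0 < pvNumEkg sig_name exclude_sigs ∧
  min ((sig_name.length : Int)) 4 ≤ (pvNumEkg sig_name exclude_sigs : Int) ∧
  (n_ekg_sigs < 0 ∨ (pvNumEkg sig_name exclude_sigs : Int) < n_ekg_sigs)
instance (n_ekg_sigs : Int) (sig_name : List String) (exclude_sigs : List Int) : Decidable (D_order_sigs n_ekg_sigs sig_name exclude_sigs) := by unfold D_order_sigs; infer_instance

def Spec_order_sigs (n_ekg_sigs : Int) (sig_name : List String) (exclude_sigs : List Int) (out : List Int × Int) : Prop := ¬ D_order_sigs n_ekg_sigs sig_name exclude_sigs → out = order_sigs_alt n_ekg_sigs sig_name exclude_sigs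
instance (n_ekg_sigs : Int) (sig_name : List String) (exclude_sigs : List Int) (out : List Int × Int) : Decidable (Spec_order_sigs n_ekg_sigs sig_name exclude_sigs out) := by unfold Spec_order_sigs; infer_instance

def pvDiffWitness_order_sigs : Int × List String × List Int := (2, ["II"], [])
def pvDiffWitnessOut_order_sigs : (List Int × Int) × (List Int × Int) := (([0, 0], 2), ([0], 1))

-- ===== CLAIM (what is proved, stated in full; the proofs are below) =====
def Claim_unchanged_order_sigs : Prop := ∀ (n_ekg_sigs : Int) (sig_name : List String) (exclude_sigs : List Int), Dom_order_sigs n_ekg_sigs sig_name exclude_sigs → Spec_order_sigs n_ekg_sigs sig_name exclude_sigs (order_sigs n_ekg_sigs sig_name exclude_sigs)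
def Claim_changed_order_sigs : Prop := Dom_order_sigs (pvDiffWitness_order_sigs.1) (pvDiffWitness_order_sigs.2.1) (pvDiffWitness_order_sigs.2.2) ∧ D_order_sigs (pvDiffWitness_order_sigs.1) (pvDiffWitness_order_sigs.2.1) (pvDiffWitness_order_sigs.2.2) ∧ order_sigs (pvDiffWitness_order_sigs.1) (pvDiffWitness_order_sigs.2.1) (pvDiffWitness_order_sigs.2.2) = pvDiffWitnessOut_order_sigs.1 ∧ order_sigs_alt (pvDiffWitness_order_sigs.1) (pvDiffWitness_order_sigs.2.1) (pvDiffWitness_order_sigs.2.2) = pvDiffWitnessOut_order_sigs.2 ∧ pvDiffWitnessOut_order_sigs.1 ≠ pvDiffWitnessOut_order_sigs.2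
def Claim_exact_order_sigs : Prop := ∀ (n_ekg_sigs : Int) (sig_name : List String) (exclude_sigs : List Int), Dom_order_sigs n_ekg_sigs sig_name exclude_sigs → D_order_sigs n_ekg_sigs sig_name exclude_sigs → order_sigs n_ekg_sigs sig_name exclude_sigs ≠ order_sigs_alt n_ekg_sigs sig_name exclude_sigs

-- ===== LEMMAS AND PROOFS =====

-- B's pass with membership phrased over the plain list (proof vehicle)
def pvPassB (N : Int) (sigs itter : List String) (so : List Int) (l : List String) : List Int :=
  l.foldl (fun so e =>
    if (so.length : Int) == N then so
    else if itter.contains e then so ++ [pvIdx sigs e] else so) so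

theorem pv_contains_ofList {α : Type} [BEq α] [LawfulBEq α] (l : List α) (x : α) :
    PySem.Set.contains (PySem.Set.ofList l) x = l.contains x := by
  simp [PySem.Set.contains_eq_listContains, PySem.Set.mem_ofList]

theorem pv_present_eq (sigs : List String) (excl : List Int) :
    pvPresent sigs excl = PySem.Set.ofList (pvItter sigs excl) := by
  simp [pvPresent, pvItter, pv_contains_ofList]

theorem pv_passB_bridge (N : Int) (sigs : List String) (excl : List Int) :
    pvEkgPassB N sigs (pvPresent sigs excl) = pvPassB N sigs (pvItter sigs excl) [] pvEkgSigs := by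
  simp only [pvEkgPassB, pvPassB, pv_present_eq, pv_contains_ofList]

-- A's pass carries (list, counter) with counter = length
theorem pv_passB_cons (N : Int) (sigs itter : List String) (so : List Int) (e : String) (l : List String) :
    pvPassB N sigs itter so (e :: l) =
      pvPassB N sigs itter
        (if (so.length : Int) = N then so else if e ∈ itter then so ++ [pvIdx sigs e] else so) l := by
  simp [pvPassB]

theorem pv_passA_eq (N : Int) (sigs itter : List String) :
    ∀ (l : List String) (so : List Int),
      l.foldl (pvEkgStepA N sigs itter) (so, (so.length : Int)) =
        (pvPassB N sigs itter so l, ((pvPassB N sigs itter so l).length : Int)) := by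
  intro l
  induction l with
  | nil => intro so; simp [pvPassB]
  | cons e l ih =>
    intro so
    rw [List.foldl_cons, pv_passB_cons]
    by_cases h : ((so.length : Int) = N)
    · simpa [pvEkgStepA, h] using ih so
    · by_cases hm : e ∈ itter
      · have := ih (so ++ [pvIdx sigs e])
        simp only [List.length_append, List.length_cons, List.length_nil] at this
        push_cast at this
        simpa [pvEkgStepA, h, hm] using this
      · simpa [pvEkgStepA, h, hm] using ih so

theorem pv_passB_stationary (N : Int) (sigs itter : List String) (l : List String) (so : List Int)
    (h : (so.length : Int) = N) : pvPassB N sigs itter so l = so := by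
  induction l with
  | nil => simp [pvPassB]
  | cons e l ih => rw [pv_passB_cons, if_pos h]; exact ih

theorem pv_passB_char (N : Int) (sigs itter : List String) :
    ∀ (l : List String) (so : List Int),
      ((pvPassB N sigs itter so l).length : Int) = N ∨
      (pvPassB N sigs itter so l).length = so.length + (l.filter (fun e => decide (e ∈ itter))).length := by
  intro l
  induction l with
  | nil => intro so; simp [pvPassB]
  | cons e l ih =>
    intro so
    rw [pv_passB_cons]
    by_cases h : ((so.length : Int) = N)
    · left; rw [if_pos h, pv_passB_stationary N sigs itter _ so h]; exact h
    · rw [if_neg h]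
      by_cases hm : e ∈ itter
      · rcases ih (so ++ [pvIdx sigs e]) with h1 | h1
        · left; simpa [hm] using h1
        · right
          simp only [List.length_append, List.length_cons, List.length_nil] at h1
          simp only [List.filter_cons]
          simpa [hm] using by omega
      · rcases ih so with h1 | h1
        · left; simpa [hm] using h1
        · right
          simp only [List.filter_cons]
          simpa [hm] using h1

theorem pv_passB_ub (N : Int) (sigs itter : List String) :
    ∀ (l : List String) (so : List Int),
      (pvPassB N sigs itter so l).length ≤ so.length + (l.filter (fun e => decide (e ∈ itter))).length := by
  intro l
  induction l with
  | nil => intro so; simp [pvPassB]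
  | cons e l ih =>
    intro so
    rw [pv_passB_cons]
    by_cases h : ((so.length : Int) = N)
    · rw [if_pos h, pv_passB_stationary N sigs itter _ so h]; simp
    · rw [if_neg h]
      simp only [List.filter_cons]
      by_cases hm : e ∈ itter
      · have := ih (so ++ [pvIdx sigs e])
        simp only [List.length_append, List.length_cons, List.length_nil] at this
        simpa [hm] using by omega
      · simpa [hm] using ih so

theorem pv_passB_le (N : Int) (sigs itter : List String) :
    ∀ (l : List String) (so : List Int),
      (so.length : Int) ≤ N → ((pvPassB N sigs itter so l).length : Int) ≤ N := by
  intro l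
  induction l with
  | nil => intro so hle; simpa [pvPassB] using hle
  | cons e l ih =>
    intro so hle
    rw [pv_passB_cons]
    by_cases h : ((so.length : Int) = N)
    · rw [if_pos h, pv_passB_stationary N sigs itter _ so h]; omega
    · rw [if_neg h]
      by_cases hm : e ∈ itter
      · have := ih (so ++ [pvIdx sigs e]) (by simp; omega)
        simpa [hm] using this
      · simpa [hm] using ih so hle

theorem pv_passB_empty (N : Int) (sigs itter : List String) :
    ∀ (l : List String) (so : List Int),
      (∀ e ∈ l, e ∉ itter) → pvPassB N sigs itter so l = so := by
  intro l
  induction l with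
  | nil => intro so _; simp [pvPassB]
  | cons e l ih =>
    intro so hmem
    rw [pv_passB_cons]
    have he : e ∉ itter := hmem e (by simp)
    have hrec := ih so (fun x hx => hmem x (by simp [hx]))
    by_cases h : ((so.length : Int) = N)
    · rw [if_pos h]; exact hrec
    · rw [if_neg h, if_neg he]; exact hrec

theorem pv_passB_mono (N : Int) (sigs itter : List String) :
    ∀ (l : List String) (so : List Int), so.length ≤ (pvPassB N sigs itter so l).length := by
  intro l
  induction l with
  | nil => intro so; simp [pvPassB]
  | cons e l ih =>
    intro so
    rw [pv_passB_cons]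
    by_cases h : ((so.length : Int) = N)
    · rw [if_pos h, pv_passB_stationary N sigs itter _ so h]
    · rw [if_neg h]
      by_cases hm : e ∈ itter
      · have := ih (so ++ [pvIdx sigs e])
        simp only [List.length_append, List.length_cons, List.length_nil] at this
        simpa [hm] using by omega
      · simpa [hm] using ih so

theorem pv_passB_grow (N : Int) (sigs itter : List String) :
    ∀ (l : List String) (so : List Int), (so.length : Int) ≠ N →
      (∃ e ∈ l, e ∈ itter) → so.length < (pvPassB N sigs itter so l).length := by
  intro l
  induction l with
  | nil => rintro so _ ⟨e, he, _⟩; simp at he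
  | cons e l ih =>
    rintro so hne ⟨x, hx, hxm⟩
    rw [pv_passB_cons, if_neg hne]
    by_cases hm : e ∈ itter
    · have h1 := pv_passB_mono N sigs itter l (so ++ [pvIdx sigs e])
      simp only [List.length_append, List.length_cons, List.length_nil] at h1
      simpa [hm] using by omega
    · rcases List.mem_cons.mp hx with rfl | hx'
      · exact absurd hxm hm
      · simpa [hm] using ih so hne ⟨x, hx', hxm⟩

theorem pv_addFirst_find (sigs itter : List String) (so : List Int) (g : List String) :
    pvAddFirstA sigs itter so g =
      (match g.find? (fun s => itter.contains s && !so.contains (pvIdx sigs s)) with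
       | some s => so ++ [pvIdx sigs s]
       | none => so) := by
  induction g with
  | nil => simp [pvAddFirstA]
  | cons b rest ih =>
    by_cases h1 : b ∈ itter
    · by_cases h2 : pvIdx sigs b ∈ so
      · rw [show pvAddFirstA sigs itter so (b :: rest) = pvAddFirstA sigs itter so rest by
          simp [pvAddFirstA, h1, h2], ih]
        simp [List.find?_cons, h1, h2]
      · simp [pvAddFirstA, h1, h2, List.find?_cons]
    · rw [show pvAddFirstA sigs itter so (b :: rest) = pvAddFirstA sigs itter so rest by
        simp [pvAddFirstA, h1], ih]
      simp [List.find?_cons, h1]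

theorem pv_pick_bridge (sigs : List String) (excl : List Int) (so : List Int) :
    pvPickGroups sigs (pvPresent sigs excl) so =
      pvAddFirstA sigs (pvItter sigs excl)
        (pvAddFirstA sigs (pvItter sigs excl) so pvBpSigs) pvRespSigs := by
  simp only [pvPickGroups, List.foldl_cons, List.foldl_nil, pv_present_eq, pv_contains_ofList]
  rw [← pv_addFirst_find, ← pv_addFirst_find]

theorem pv_outer_done (N : Int) (sigs itter : List String) (x : List Int) (y : Int) :
    pvOuterStep N sigs itter (x, y, true) = (x, y, true) := by
  simp [pvOuterStep]

theorem pv_outer_eval (N : Int) (sigs itter : List String) (so : List Int) :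
    pvOuterStep N sigs itter (so, (so.length : Int), false) =
      (if ((pvPassB N sigs itter so pvEkgSigs).length : Int) < min (sigs.length : Int) 4 then
        (pvAddFirstA sigs itter
          (pvAddFirstA sigs itter (pvPassB N sigs itter so pvEkgSigs) pvBpSigs) pvRespSigs,
         ((pvPassB N sigs itter so pvEkgSigs).length : Int), true)
      else (pvPassB N sigs itter so pvEkgSigs, ((pvPassB N sigs itter so pvEkgSigs).length : Int), false)) := by
  have h := pv_passA_eq N sigs itter pvEkgSigs so
  simp only [pvOuterStep, h]
  rfl

theorem pv_A_eval (N : Int) (sigs : List String) (excl : List Int) :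
    order_sigs N sigs excl =
      ((pvOuterStep N sigs (pvItter sigs excl) (pvOuterStep N sigs (pvItter sigs excl)
        (pvOuterStep N sigs (pvItter sigs excl) ([], 0, false)))).1,
       (pvOuterStep N sigs (pvItter sigs excl) (pvOuterStep N sigs (pvItter sigs excl)
        (pvOuterStep N sigs (pvItter sigs excl) ([], 0, false)))).2.1) := rfl

theorem pv_B_eval (N : Int) (sigs : List String) (excl : List Int) :
    order_sigs_alt N sigs excl =
      (if ((pvPassB N sigs (pvItter sigs excl) [] pvEkgSigs).length : Int) < min (sigs.length : Int) 4 then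
         pvPickGroups sigs (pvPresent sigs excl) (pvPassB N sigs (pvItter sigs excl) [] pvEkgSigs)
       else pvPassB N sigs (pvItter sigs excl) [] pvEkgSigs,
       ((pvPassB N sigs (pvItter sigs excl) [] pvEkgSigs).length : Int)) := by
  simp only [order_sigs_alt, pv_passB_bridge]

theorem pv_init_state : (([], 0, false) : List Int × Int × Bool) =
    (([] : List Int), ((([] : List Int)).length : Int), false) := rfl

-- deciding whether A's pass is a no-op on the second and third round, outside D_
theorem pv_pass2_noop (N : Int) (sigs : List String) (excl : List Int)
    (hnd : ¬ D_order_sigs N sigs excl)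
    (hge : ¬ ((pvPassB N sigs (pvItter sigs excl) [] pvEkgSigs).length : Int) < min (sigs.length : Int) 4) :
    pvPassB N sigs (pvItter sigs excl) (pvPassB N sigs (pvItter sigs excl) [] pvEkgSigs) pvEkgSigs =
      pvPassB N sigs (pvItter sigs excl) [] pvEkgSigs := by
  have hkk : pvNumEkg sigs excl = (pvEkgSigs.filter (fun e => decide (e ∈ pvItter sigs excl))).length := by
    simp [pvNumEkg]
  rcases pv_passB_char N sigs (pvItter sigs excl) pvEkgSigs [] with hc | hc
  · exact pv_passB_stationary N sigs (pvItter sigs excl) pvEkgSigs _ hc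
  · simp only [List.length_nil, Nat.zero_add] at hc
    by_cases hk0 : (pvEkgSigs.filter (fun e => decide (e ∈ pvItter sigs excl))).length = 0
    · have hemp : ∀ e ∈ pvEkgSigs, e ∉ pvItter sigs excl := by
        have := List.length_eq_zero_iff.mp hk0
        intro e he hmem
        have : e ∈ (pvEkgSigs.filter (fun e => decide (e ∈ pvItter sigs excl))) :=
          List.mem_filter.mpr ⟨he, by simpa using hmem⟩
        simp [List.length_eq_zero_iff.mp hk0] at this
      exact pv_passB_empty N sigs (pvItter sigs excl) pvEkgSigs _ hemp
    · unfold D_order_sigs at hnd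
      push Not at hnd
      rw [hkk] at hnd
      have h3 := hnd (by omega) (by rw [hc] at hge; omega)
      have hle := pv_passB_le N sigs (pvItter sigs excl) pvEkgSigs []
        (by simpa using h3.1)
      have heq : ((pvPassB N sigs (pvItter sigs excl) [] pvEkgSigs).length : Int) = N := by
        omega
      exact pv_passB_stationary N sigs (pvItter sigs excl) pvEkgSigs _ heq

-- ===== VERDICT (by name: the statement is the Claim_ definition above) =====
theorem order_sigs_spec : Claim_unchanged_order_sigs := by
  intro N sigs excl _hd hnd
  show order_sigs N sigs excl = order_sigs_alt N sigs excl
  rw [pv_A_eval, pv_B_eval, pv_init_state, pv_outer_eval]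
  by_cases hlt : ((pvPassB N sigs (pvItter sigs excl) [] pvEkgSigs).length : Int) < min (sigs.length : Int) 4
  · rw [if_pos hlt, if_pos hlt, pv_outer_done, pv_outer_done, pv_pick_bridge]
  · rw [if_neg hlt, if_neg hlt, pv_outer_eval]
    have hno := pv_pass2_noop N sigs excl hnd hlt
    rw [hno, if_neg hlt, pv_outer_eval, hno, if_neg hlt]

theorem order_sigs_changed : Claim_changed_order_sigs := by
  unfold Claim_changed_order_sigs; decide

theorem order_sigs_tight : Claim_exact_order_sigs := by
  intro N sigs excl _hd hD
  obtain ⟨hk0, hkm, hN⟩ := hD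
  have hkk : pvNumEkg sigs excl = (pvEkgSigs.filter (fun e => decide (e ∈ pvItter sigs excl))).length := by
    simp [pvNumEkg]
  rw [hkk] at hk0 hkm hN
  -- first pass fills exactly the k present EKG indices
  have hub := pv_passB_ub N sigs (pvItter sigs excl) pvEkgSigs []
  simp only [List.length_nil, Nat.zero_add] at hub
  have hc : (pvPassB N sigs (pvItter sigs excl) [] pvEkgSigs).length =
      (pvEkgSigs.filter (fun e => decide (e ∈ pvItter sigs excl))).length := by
    rcases pv_passB_char N sigs (pvItter sigs excl) pvEkgSigs [] with hc | hc
    · exfalso; rcases hN with h | h <;> omega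
    · simpa using hc
  have hge : ¬ ((pvPassB N sigs (pvItter sigs excl) [] pvEkgSigs).length : Int) < min (sigs.length : Int) 4 := by
    omega
  have hneN : ((pvPassB N sigs (pvItter sigs excl) [] pvEkgSigs).length : Int) ≠ N := by
    rcases hN with h | h <;> omega
  have hex : ∃ e ∈ pvEkgSigs, e ∈ pvItter sigs excl := by
    have hne : (pvEkgSigs.filter (fun e => decide (e ∈ pvItter sigs excl))) ≠ [] := by
      intro h; rw [h] at hk0; simp at hk0
    obtain ⟨x, hx⟩ := List.exists_mem_of_ne_nil _ hne
    have := List.mem_filter.mp hx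
    exact ⟨x, this.1, by simpa using this.2⟩
  have hgrow := pv_passB_grow N sigs (pvItter sigs excl) pvEkgSigs
    (pvPassB N sigs (pvItter sigs excl) [] pvEkgSigs) hneN hex
  have hmono := pv_passB_mono N sigs (pvItter sigs excl) pvEkgSigs
    (pvPassB N sigs (pvItter sigs excl) (pvPassB N sigs (pvItter sigs excl) [] pvEkgSigs) pvEkgSigs)
  rw [pv_A_eval, pv_B_eval, pv_init_state, pv_outer_eval, if_neg hge, pv_outer_eval]
  have hge2 : ¬ ((pvPassB N sigs (pvItter sigs excl)
      (pvPassB N sigs (pvItter sigs excl) [] pvEkgSigs) pvEkgSigs).length : Int) < min (sigs.length : Int) 4 := by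
    omega
  rw [if_neg hge2, pv_outer_eval, if_neg hge]
  by_cases hlt3 : ((pvPassB N sigs (pvItter sigs excl) (pvPassB N sigs (pvItter sigs excl)
      (pvPassB N sigs (pvItter sigs excl) [] pvEkgSigs) pvEkgSigs) pvEkgSigs).length : Int) < min (sigs.length : Int) 4
  · exact absurd hlt3 (by omega)
  · rw [if_neg hlt3]
    intro heq
    have h1 := congrArg (fun p => p.1.length) heq
    simp only at h1
    omega
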